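-- pv_equiv track=rewrite | github.com/jonglee823/algorithm | softeer/level2/전광판.py | pushSwith
-- ===== SOURCE A (Python) =====
-- graph=[
--     [], #0
--     [(1,3),(3,5)], #1
--     [(0,1), (1,3), (2, 3), (2,4), (4,5)], #2
--     [(0,1), (1,3), (2,3), (3,5), (4,5)], #3
--     [(0,2), (2,3), (1,3), (3,5) ], #4
--     [(0,1), (0,2), (2,3), (3,5), (4,5)], #5
--     [(0, 2), (2,4), (2,3), (3,5), (4,5)], #6
--     [(0,1), (0,2), (1,3), (3,5)], #7
--     [(0,1),(0,2),(1,3),(2,3),(2,4),(3,5),(4,5)], #8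
--     [(0, 1), (0,2), (1,3), (2,3), (3,5), (4,5)] #9
-- ]
--
-- beforeA = '00000'
--
-- def pushSwith(beforeNumber, number):
--     number = number.zfill(5)
--     result = 0
--
--     for x in range(4, -1, -1):
--         pushCount = 0
--         befor = int(beforeA[x])
--         now = int(number[x])
--
--         if now == 0 and befor == 0:
--             continue
--         pushCount += (len(list(set(graph[now]) - set(graph[befor])))//2) #켜야하는 숫자자
--         pushCount -= (len(list(set(graph[befor]) & set(graph[now])))//2) #이미 그전 숫자에 켜져있는경우
--         pushCount += (len(list(set(graph[befor]) - set(graph[now])))//2) #꺼야하는 숫자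
--         result += pushCount
--     return result
-- ===== SOURCE B (Python) =====
-- # Flat per-digit press-count table (values = len(set(graph[d]))//2 of A's rows;
-- # beforeA is always '00000' in A, so only the new digit's segments matter).
-- SEG = [0, 1, 2, 2, 2, 2, 2, 2, 3, 3]
--
-- def pushSwith(beforeNumber, number):
--     number = number.zfill(5)
--     return sum(SEG[int(number[x])] for x in range(5))
-- ===== Notes on version B (the rewrite author's own statement) =====
-- stated objective: simpler
-- what changed: Replaces the per-position set-difference/intersection computations (A's 'previous' digit is always 0, from the fixed global beforeA) with one precomputed flat table SEG and a single sum over the first five zfilled characters.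
import Mathlib
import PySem

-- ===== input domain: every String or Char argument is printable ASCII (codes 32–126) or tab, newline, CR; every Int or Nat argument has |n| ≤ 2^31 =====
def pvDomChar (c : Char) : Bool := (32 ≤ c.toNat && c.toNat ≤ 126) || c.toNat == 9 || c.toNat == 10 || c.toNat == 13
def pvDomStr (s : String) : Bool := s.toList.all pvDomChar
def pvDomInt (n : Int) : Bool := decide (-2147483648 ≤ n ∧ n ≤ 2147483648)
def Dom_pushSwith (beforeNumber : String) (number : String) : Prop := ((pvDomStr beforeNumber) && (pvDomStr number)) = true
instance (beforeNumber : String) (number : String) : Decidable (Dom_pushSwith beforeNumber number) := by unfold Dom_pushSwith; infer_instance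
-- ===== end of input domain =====

-- B replaces A's per-position set differences/intersections (taken against the fixed all-zero
-- global beforeA) with one precomputed per-digit table summed over the zfilled string: simpler.


-- ===== PORT A =====
-- module-level constant 'graph'
def pvGraph : List (List (Int × Int)) :=
  [ [],
    [(1,3),(3,5)],
    [(0,1),(1,3),(2,3),(2,4),(4,5)],
    [(0,1),(1,3),(2,3),(3,5),(4,5)],
    [(0,2),(2,3),(1,3),(3,5)],
    [(0,1),(0,2),(2,3),(3,5),(4,5)],
    [(0,2),(2,4),(2,3),(3,5),(4,5)],
    [(0,1),(0,2),(1,3),(3,5)],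
    [(0,1),(0,2),(1,3),(2,3),(2,4),(3,5),(4,5)],
    [(0,1),(0,2),(1,3),(2,3),(3,5),(4,5)] ]

-- int(s[x]); '.getD 0' totalizes: 'none' (IndexError / ValueError) is excluded by Pre_
def pvDigitAt (cs : List Char) (x : Int) : Int :=
  ((PySem.Chars.pyGet? cs x).bind (fun c => PySem.Int.ofChars? [c])).getD 0

-- graph[n]; for the digits 0..9 reached under Pre_ the index is always in range
def pvRowAt (n : Int) : List (Int × Int) := (PySem.List.pyGet? pvGraph n).getD []

-- the body of A's 'for x in range(4, -1, -1)' loop (result is the running accumulator)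
def pvStepA (num : List Char) (result : Int) (x : Int) : Int :=
  let befor := pvDigitAt "00000".toList x
  let now := pvDigitAt num x
  if now = 0 ∧ befor = 0 then result
  else
    let pushCount : Int := 0
    let pushCount := pushCount +
      PySem.Int.floordiv ((PySem.Set.diff (PySem.Set.ofList (pvRowAt now)) (PySem.Set.ofList (pvRowAt befor))).length : Int) 2
    let pushCount := pushCount -
      PySem.Int.floordiv ((PySem.Set.inter (PySem.Set.ofList (pvRowAt befor)) (PySem.Set.ofList (pvRowAt now))).length : Int) 2
    let pushCount := pushCount +
      PySem.Int.floordiv ((PySem.Set.diff (PySem.Set.ofList (pvRowAt befor)) (PySem.Set.ofList (pvRowAt now))).length : Int) 2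
    result + pushCount

def pushSwith (beforeNumber : String) (number : String) : Int :=
  let num := PySem.Chars.zfill number.toList 5
  (PySem.List.pyRange 4 (-1) (-1)).foldl (pvStepA num) 0

-- ===== PORT B =====
def pvSEG : List Int := [0, 1, 2, 2, 2, 2, 2, 2, 3, 3]

def pushSwith_alt (beforeNumber : String) (number : String) : Int :=
  let num := PySem.Chars.zfill number.toList 5
  ((PySem.List.pyRange 0 5 1).map (fun x =>
    (PySem.List.pyGet? pvSEG (pvDigitAt num x)).getD 0)).sum

-- ===== PRECONDITION & SPEC =====
-- Pre_ excludes exactly the inputs where A raises ValueError (and B raises it too): some of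
-- the first five characters of number.zfill(5) is not a decimal digit, so int() fails on it.
def Pre_pushSwith (beforeNumber : String) (number : String) : Prop :=
  ((PySem.Chars.zfill number.toList 5).take 5).all PySem.Chars.isdigit = true
instance (beforeNumber : String) (number : String) : Decidable (Pre_pushSwith beforeNumber number) := by
  unfold Pre_pushSwith; infer_instance
def pvWitness_pushSwith : String × String := ("00000", "123")

def Spec_pushSwith (beforeNumber : String) (number : String) (out : Int) : Prop := out = pushSwith_alt beforeNumber number
instance (beforeNumber : String) (number : String) (out : Int) : Decidable (Spec_pushSwith beforeNumber number out) := by unfold Spec_pushSwith; infer_instance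

-- ===== CLAIM (what is proved, stated in full; the proofs are below) =====
def Claim_equal_pushSwith : Prop := ∀ (beforeNumber : String) (number : String), Dom_pushSwith beforeNumber number → Pre_pushSwith beforeNumber number → Spec_pushSwith beforeNumber number (pushSwith beforeNumber number)

-- ===== LEMMAS AND PROOFS =====

-- B's per-position summand, as a function of the digit character
def pvSegB (c : Char) : Int :=
  (PySem.List.pyGet? pvSEG ((PySem.Int.ofChars? [c]).getD 0)).getD 0

lemma digit_mem (c : Char) (h : PySem.Chars.isdigit c = true) :
    c ∈ ['0','1','2','3','4','5','6','7','8','9'] := by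
  simp only [PySem.Chars.isdigit, Bool.and_eq_true, decide_eq_true_eq] at h
  obtain ⟨ha, hb⟩ := h
  rw [Char.le_def, UInt32.le_iff_toNat_le] at ha hb
  have h1 : 48 ≤ c.toNat := ha
  have h2 : c.toNat ≤ 57 := hb
  have h3 : c = Char.ofNat c.toNat := by simp [Char.ofNat_toNat]
  interval_cases hc : c.toNat <;> rw [h3] <;> decide

-- A's per-position contribution, as a function of the digit value (befor is always 0)
def pvContrib (now : Int) : Int :=
  if now = 0 then 0
  else
    0 + PySem.Int.floordiv ((PySem.Set.diff (PySem.Set.ofList (pvRowAt now)) (PySem.Set.ofList (pvRowAt 0))).length : Int) 2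
      - PySem.Int.floordiv ((PySem.Set.inter (PySem.Set.ofList (pvRowAt 0)) (PySem.Set.ofList (pvRowAt now))).length : Int) 2
      + PySem.Int.floordiv ((PySem.Set.diff (PySem.Set.ofList (pvRowAt 0)) (PySem.Set.ofList (pvRowAt now))).length : Int) 2

lemma stepA_eval (num : List Char) (r x : Int)
    (hb : pvDigitAt "00000".toList x = 0) :
    pvStepA num r x = r + pvContrib (pvDigitAt num x) := by
  unfold pvStepA pvContrib
  rw [hb]
  simp only [and_true]
  split_ifs with h
  · ring
  · ring

lemma contrib_seg (c : Char) (hd : PySem.Chars.isdigit c = true) :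
    pvContrib ((PySem.Int.ofChars? [c]).getD 0) = pvSegB c := by
  have hm := digit_mem c hd
  simp only [List.mem_cons, List.not_mem_nil, or_false] at hm
  rcases hm with h|h|h|h|h|h|h|h|h|h <;> rw [h] <;> decide

lemma exists_five (cs : List Char) (hlen : 5 ≤ cs.length) :
    ∃ c0 c1 c2 c3 c4 rest, cs = c0::c1::c2::c3::c4::rest :=
  match cs, hlen with
  | c0::c1::c2::c3::c4::rest, _ => ⟨c0,c1,c2,c3,c4,rest,rfl⟩

-- ===== VERDICT (by name: the statement is the Claim_ definition above) =====
theorem pushSwith_spec : Claim_equal_pushSwith := by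
  intro bn n _ hpre
  unfold Spec_pushSwith
  simp only [pushSwith, pushSwith_alt]
  unfold Pre_pushSwith at hpre
  have hlen : 5 ≤ (PySem.Chars.zfill n.toList 5).length := by
    simp [PySem.Chars.length_zfill]
  obtain ⟨c0,c1,c2,c3,c4,rest,hcs⟩ := exists_five _ hlen
  rw [hcs] at hpre ⊢
  simp only [List.take_succ_cons, List.take_zero, List.all_cons, List.all_nil,
    Bool.and_eq_true, Bool.and_true] at hpre
  obtain ⟨h0, h1, h2, h3, h4⟩ := hpre
  have d0 : pvDigitAt (c0::c1::c2::c3::c4::rest) 0 = (PySem.Int.ofChars? [c0]).getD 0 := by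
    unfold pvDigitAt
    rw [PySem.Chars.pyGet?_eq_listPyGet?, show ((0:Int)) = ((0:Nat):Int) from rfl,
        PySem.List.pyGet?_natCast]
    simp
  have d1 : pvDigitAt (c0::c1::c2::c3::c4::rest) 1 = (PySem.Int.ofChars? [c1]).getD 0 := by
    unfold pvDigitAt
    rw [PySem.Chars.pyGet?_eq_listPyGet?, show ((1:Int)) = ((1:Nat):Int) from rfl,
        PySem.List.pyGet?_natCast]
    simp
  have d2 : pvDigitAt (c0::c1::c2::c3::c4::rest) 2 = (PySem.Int.ofChars? [c2]).getD 0 := by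
    unfold pvDigitAt
    rw [PySem.Chars.pyGet?_eq_listPyGet?, show ((2:Int)) = ((2:Nat):Int) from rfl,
        PySem.List.pyGet?_natCast]
    simp
  have d3 : pvDigitAt (c0::c1::c2::c3::c4::rest) 3 = (PySem.Int.ofChars? [c3]).getD 0 := by
    unfold pvDigitAt
    rw [PySem.Chars.pyGet?_eq_listPyGet?, show ((3:Int)) = ((3:Nat):Int) from rfl,
        PySem.List.pyGet?_natCast]
    simp
  have d4 : pvDigitAt (c0::c1::c2::c3::c4::rest) 4 = (PySem.Int.ofChars? [c4]).getD 0 := by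
    unfold pvDigitAt
    rw [PySem.Chars.pyGet?_eq_listPyGet?, show ((4:Int)) = ((4:Nat):Int) from rfl,
        PySem.List.pyGet?_natCast]
    simp
  rw [show PySem.List.pyRange 4 (-1) (-1) = [4,3,2,1,0] from by decide,
      show PySem.List.pyRange 0 5 1 = [0,1,2,3,4] from by decide]
  simp only [List.foldl, List.map, List.sum_cons, List.sum_nil]
  rw [stepA_eval _ _ 4 (by decide), stepA_eval _ _ 3 (by decide),
      stepA_eval _ _ 2 (by decide), stepA_eval _ _ 1 (by decide),
      stepA_eval _ _ 0 (by decide),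
      d0, d1, d2, d3, d4,
      contrib_seg c0 h0, contrib_seg c1 h1, contrib_seg c2 h2,
      contrib_seg c3 h3, contrib_seg c4 h4]
  simp only [pvSegB]
  ring
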